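-- pv_equiv track=rewrite | github.com/log2timeline/l2tdevtools | l2tdevtools/dependency_writers/gift_ppa.py | _FormatDPKGPythonDependencies
-- ===== SOURCE A (Python) =====
-- def _FormatDPKGPythonDependencies(
--     python_dependencies, python_version=2):
--   """Formats DPKG Python dependencies for the template.
--
--   Args:
--     python_dependencies (list[str]): DPKG package names of Python
--         dependencies.
--     python_version (Optional[int]): Python major version.
--
--   Returns:
--     str: formatted DPKG Python dependencies.
--   """
--   formatted_python_dependencies = []
--
--   for index, dependency in enumerate(sorted(python_dependencies)):
--     if index == 0:
--       line = 'PYTHON{0:d}_DEPENDENCIES="{1:s}'.format(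
--           python_version, dependency)
--     else:
--       line = '                      {0:s}'.format(dependency)
--
--     if index + 1 == len(python_dependencies):
--       line = '{0:s}";'.format(line)
--
--     formatted_python_dependencies.append(line)
--
--   return '\n'.join(formatted_python_dependencies)
-- ===== SOURCE B (Python) =====
-- def _FormatDPKGPythonDependencies(
--     python_dependencies, python_version=2):
--   """Formats DPKG Python dependencies for the template."""
--   sorted_dependencies = sorted(python_dependencies)
--   if not sorted_dependencies:
--     return ''
--   body = ('\n' + ' ' * 22).join(sorted_dependencies)
--   return 'PYTHON{0:d}_DEPENDENCIES="{1:s}";'.format(python_version, body)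
-- ===== Notes on version B (the rewrite author's own statement) =====
-- stated objective: simpler
-- what changed: Replaces A's enumerate loop with first-index/last-index branches by an empty-list guard, a single join of the sorted list with a '\n'+22-space separator, and one final format call; the single join avoids per-line formatting and list building, a constant-factor win.
import Mathlib
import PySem

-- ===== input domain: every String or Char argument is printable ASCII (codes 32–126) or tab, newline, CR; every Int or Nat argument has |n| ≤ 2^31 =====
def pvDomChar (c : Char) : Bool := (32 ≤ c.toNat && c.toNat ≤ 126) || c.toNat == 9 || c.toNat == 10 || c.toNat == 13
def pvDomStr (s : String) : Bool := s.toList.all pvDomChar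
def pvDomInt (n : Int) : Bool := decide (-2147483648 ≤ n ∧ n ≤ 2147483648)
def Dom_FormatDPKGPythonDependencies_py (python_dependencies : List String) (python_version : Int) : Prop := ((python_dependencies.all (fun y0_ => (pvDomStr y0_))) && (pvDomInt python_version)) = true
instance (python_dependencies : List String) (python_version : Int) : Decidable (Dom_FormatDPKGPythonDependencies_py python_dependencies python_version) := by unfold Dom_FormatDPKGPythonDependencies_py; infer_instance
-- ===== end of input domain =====

-- B replaces A's enumerate loop with first/last index branches by one guarded
-- join over the sorted list plus one final format call (objective: simpler).

-- ===== PORT A =====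
-- the per-index line builder of A's loop body
def pvLineA (python_version : Int) (n : Int) (p : Int × String) : String :=
  let line :=
    if p.1 == 0 then
      "PYTHON" ++ PySem.Int.toStr python_version ++ "_DEPENDENCIES=\"" ++ p.2
    else
      "                      " ++ p.2
  if p.1 + 1 == n then line ++ "\";" else line

def FormatDPKGPythonDependencies_py (python_dependencies : List String) (python_version : Int) : String :=
  let formatted :=
    (PySem.List.enumerate (PySem.List.sorted python_dependencies (fun x => x) false) 0).foldl
      (fun acc p => acc ++ [pvLineA python_version (python_dependencies.length : Int) p]) []
  PySem.Str.join "\n" formatted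

-- ===== PORT B =====
def FormatDPKGPythonDependencies_py_alt (python_dependencies : List String) (python_version : Int) : String :=
  let sortedDependencies := PySem.List.sorted python_dependencies (fun x => x) false
  if sortedDependencies = [] then ""
  else
    "PYTHON" ++ PySem.Int.toStr python_version ++ "_DEPENDENCIES=\"" ++
      PySem.Str.join ("\n" ++ "                      ") sortedDependencies ++ "\";"

-- ===== PRECONDITION & SPEC =====
def Spec_FormatDPKGPythonDependencies_py (python_dependencies : List String) (python_version : Int) (out : String) : Prop := out = FormatDPKGPythonDependencies_py_alt python_dependencies python_version
instance (python_dependencies : List String) (python_version : Int) (out : String) : Decidable (Spec_FormatDPKGPythonDependencies_py python_dependencies python_version out) := by unfold Spec_FormatDPKGPythonDependencies_py; infer_instance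

-- ===== CLAIM (what is proved, stated in full; the proofs are below) =====
def Claim_equal_FormatDPKGPythonDependencies_py : Prop := ∀ (python_dependencies : List String) (python_version : Int), Dom_FormatDPKGPythonDependencies_py python_dependencies python_version → Spec_FormatDPKGPythonDependencies_py python_dependencies python_version (FormatDPKGPythonDependencies_py python_dependencies python_version)

-- ===== LEMMAS AND PROOFS =====

-- the join of A's tail lines (indices ≥ 1, last index n-1) collapses to one
-- indented join with the closing quote appended
theorem pvTailJoin (v : Int) (a : String) (t : List String) (k n : Int)
    (hk : 1 ≤ k) (hn : k + 1 + t.length = n) :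
    PySem.Chars.join "\n".toList
        (((PySem.List.enumerate (a :: t) k).map (pvLineA v n)).map String.toList)
      = "                      ".toList ++
          PySem.Chars.join ("\n" ++ "                      ").toList
            (List.map String.toList (a :: t)) ++ "\";".toList := by
  induction t generalizing a k with
  | nil =>
      have h0 : (k == 0) = false := by simp; omega
      have h1 : (k + 1 == n) = true := by simp at hn ⊢; omega
      simp [PySem.List.enumerate_cons, PySem.List.enumerate_nil, pvLineA, h0, h1,
        PySem.Chars.join_singleton, String.toList_append]
  | cons b r ih =>
      have h0 : (k == 0) = false := by simp; omega
      have h1 : (k + 1 == n) = false := by simp at hn ⊢; omega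
      have ih' := ih b (k + 1) (by omega) (by simp at hn ⊢; omega)
      simp only [PySem.List.enumerate_cons, List.map_cons,
        PySem.Chars.join_cons_cons, pvLineA, h0, h1, Bool.false_eq_true, if_false]
      simp only [PySem.List.enumerate_cons, List.map_cons, pvLineA] at ih'
      rw [ih']
      simp [String.toList_append, List.append_assoc]

-- main equality on an arbitrary sorted list, stated over toList
theorem pvMain (v : Int) (s : List String) :
    (PySem.Str.join "\n"
        ((PySem.List.enumerate s 0).map (pvLineA v (s.length : Int)))).toList
      = (if s = [] then ""
         else
           "PYTHON" ++ PySem.Int.toStr v ++ "_DEPENDENCIES=\"" ++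
             PySem.Str.join ("\n" ++ "                      ") s ++ "\";").toList := by
  cases s with
  | nil =>
      simp [PySem.List.enumerate_nil, PySem.Str.toList_join, PySem.Chars.join_nil]
  | cons a t =>
      cases t with
      | nil =>
          simp [PySem.List.enumerate_cons, PySem.List.enumerate_nil, pvLineA,
            PySem.Str.toList_join, PySem.Chars.join_singleton, String.toList_append]
      | cons b r =>
          have h1 : ((0 : Int) + 1 == ((a :: b :: r).length : Int)) = false := by simp; omega
          have htail := pvTailJoin v b r 1 ((a :: b :: r).length : Int) (le_refl 1)
            (by simp; omega)
          simp only [PySem.List.enumerate_cons, List.map_cons,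
            PySem.Str.toList_join, PySem.Chars.join_cons_cons]
          simp only [zero_add]
          simp only [PySem.List.enumerate_cons, List.map_cons] at htail
          rw [htail]
          have hA : pvLineA v ((a :: b :: r).length : Int) (0, a)
              = "PYTHON" ++ PySem.Int.toStr v ++ "_DEPENDENCIES=\"" ++ a := by
            simp [pvLineA]; omega
          rw [hA]
          simp [String.toList_append, PySem.Chars.join_cons_cons, List.append_assoc]

-- ===== VERDICT (by name: the statement is the Claim_ definition above) =====
theorem FormatDPKGPythonDependencies_py_spec : Claim_equal_FormatDPKGPythonDependencies_py := by
  intro deps v _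
  unfold Spec_FormatDPKGPythonDependencies_py
  unfold FormatDPKGPythonDependencies_py FormatDPKGPythonDependencies_py_alt
  apply String.toList_inj.mp
  simp only [PySem.List.foldl_append_singleton_eq_map, List.nil_append]
  have hlen : deps.length = (PySem.List.sorted deps (fun x => x) false).length :=
    (PySem.List.length_sorted deps (fun x => x) false).symm
  rw [hlen]
  exact pvMain v (PySem.List.sorted deps (fun x => x) false)
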